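-- pv_equiv track=rewrite | github.com/elijahpetty/deephaven-core | docs/tools/compare/compare_python_groovy_docs.py | _normalize_reference_param_tables
-- ===== SOURCE A (Python) =====
-- def _normalize_reference_param_tables(content: str) -> str:
--     """Normalize <ParamTable> blocks in reference docs.
--
--     Parameter sections are expected to differ between Python and Groovy reference docs.
--     To avoid spurious diffs while preserving line numbers, replace every line inside
--     <ParamTable>...</ParamTable> with a stable placeholder line.
--     """
--     lines = content.splitlines(keepends=False)
--     result = []
--     in_param_table = False
--
--     for line in lines:
--         stripped = line.strip()
--         # Start of a ParamTable block
--         if stripped.startswith("<ParamTable"):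
--             in_param_table = True
--             result.append("<ParamTable OMITTED/>")
--             continue
--
--         # Inside a ParamTable block - replace all lines with placeholder
--         if in_param_table:
--             result.append("<ParamTable OMITTED/>")
--             # Check if this is the closing tag
--             if stripped.startswith("</ParamTable"):
--                 in_param_table = False
--             continue
--
--         # Regular line outside ParamTable - keep as-is
--         result.append(line)
--
--     return "\n".join(result)
-- ===== SOURCE B (Python) =====
-- def _normalize_reference_param_tables(content: str) -> str:
--     """Same normalization, but with an explicit index and a dedicated inner loop
--     that consumes a ParamTable block, instead of a flag carried across one pass."""
--     lines = content.splitlines(keepends=False)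
--     result = []
--     i = 0
--     n = len(lines)
--     while i < n:
--         if lines[i].strip().startswith("<ParamTable"):
--             # opening line; the inner loop consumes lines until (and including)
--             # the line whose strip starts with the closing tag, or end of input.
--             result.append("<ParamTable OMITTED/>")
--             i += 1
--             while i < n:
--                 result.append("<ParamTable OMITTED/>")
--                 if lines[i].strip().startswith("</ParamTable"):
--                     i += 1
--                     break
--                 i += 1
--         else:
--             result.append(lines[i])
--             i += 1
--     return "\n".join(result)
-- ===== Notes on version B (the rewrite author's own statement) =====
-- stated objective: alternative
-- what changed: Replaces the single flag-driven pass with an explicit-index outer loop plus a dedicated inner loop that consumes each ParamTable block until its closing tag; no boolean state crosses iterations.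
import Mathlib
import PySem

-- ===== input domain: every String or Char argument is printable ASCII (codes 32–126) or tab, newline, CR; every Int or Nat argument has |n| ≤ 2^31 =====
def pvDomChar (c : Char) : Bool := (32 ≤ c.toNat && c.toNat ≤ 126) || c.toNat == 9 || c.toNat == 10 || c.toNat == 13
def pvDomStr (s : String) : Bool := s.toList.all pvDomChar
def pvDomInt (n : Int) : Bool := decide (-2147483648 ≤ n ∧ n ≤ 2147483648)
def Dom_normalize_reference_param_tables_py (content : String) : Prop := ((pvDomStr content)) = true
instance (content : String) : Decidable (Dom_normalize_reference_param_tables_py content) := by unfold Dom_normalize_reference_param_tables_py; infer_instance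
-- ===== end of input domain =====

-- B replaces A's flag-carrying single pass with an outer loop plus a dedicated inner loop
-- consuming each ParamTable block (objective: alternative decomposition, same output).

-- ===== PORT A =====
-- one step of A's for-loop: state is (result so far, in_param_table flag)
def pvStepA (st : List String × Bool) (line : String) : List String × Bool :=
  let stripped := PySem.Str.strip line
  if PySem.Str.startswith stripped "<ParamTable" then
    (st.1 ++ ["<ParamTable OMITTED/>"], true)
  else if st.2 then
    (st.1 ++ ["<ParamTable OMITTED/>"],
     if PySem.Str.startswith stripped "</ParamTable" then false else st.2)
  else
    (st.1 ++ [line], st.2)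

def normalize_reference_param_tables_py (content : String) : String :=
  let lines := PySem.Str.splitlines content
  let st := lines.foldl pvStepA ([], false)
  PySem.Str.join "\n" st.1

-- ===== PORT B =====
-- B's outer while-loop: emit lines verbatim; on an opening line, hand over to the inner loop
mutual
def pvOuterB : List String → List String
  | [] => []
  | l :: rest =>
    if PySem.Str.startswith (PySem.Str.strip l) "<ParamTable" then
      "<ParamTable OMITTED/>" :: pvInnerB rest
    else
      l :: pvOuterB rest
-- B's inner while-loop: placeholder for every line, stop after the closing-tag line
def pvInnerB : List String → List String
  | [] => []
  | l :: rest =>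
    "<ParamTable OMITTED/>" ::
      (if PySem.Str.startswith (PySem.Str.strip l) "</ParamTable" then pvOuterB rest
       else pvInnerB rest)
end

def normalize_reference_param_tables_py_alt (content : String) : String :=
  PySem.Str.join "\n" (pvOuterB (PySem.Str.splitlines content))

-- ===== PRECONDITION & SPEC =====
def Spec_normalize_reference_param_tables_py (content : String) (out : String) : Prop := out = normalize_reference_param_tables_py_alt content
instance (content : String) (out : String) : Decidable (Spec_normalize_reference_param_tables_py content out) := by unfold Spec_normalize_reference_param_tables_py; infer_instance

-- ===== CLAIM (what is proved, stated in full; the proofs are below) =====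
def Claim_equal_normalize_reference_param_tables_py : Prop := ∀ (content : String), Dom_normalize_reference_param_tables_py content → Spec_normalize_reference_param_tables_py content (normalize_reference_param_tables_py content)

-- ===== LEMMAS AND PROOFS =====

-- a stripped line cannot start with both the opening and the closing tag
theorem pv_open_not_close (cs : List Char)
    (h : PySem.Chars.startswith cs ['<','P','a','r','a','m','T','a','b','l','e'] = true) :
    PySem.Chars.startswith cs ['<','/','P','a','r','a','m','T','a','b','l','e'] = false := by
  by_contra h'
  rw [Bool.not_eq_false] at h'
  rw [PySem.Chars.startswith_iff] at h h'
  have := List.prefix_of_prefix_length_le h h' (by decide)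
  revert this; decide

-- A's fold with flag false computes acc ++ B's outer loop, and with flag true acc ++ B's inner loop
theorem pv_fold_eq (lines : List String) : ∀ (acc : List String),
    (lines.foldl pvStepA (acc, false)).1 = acc ++ pvOuterB lines ∧
    (lines.foldl pvStepA (acc, true)).1 = acc ++ pvInnerB lines := by
  induction lines with
  | nil => intro acc; simp [pvOuterB, pvInnerB]
  | cons l rest ih =>
    intro acc
    by_cases hop : PySem.Chars.startswith (PySem.Chars.strip l.toList) ['<','P','a','r','a','m','T','a','b','l','e'] = true
    · constructor
      · simp [pvStepA, pvOuterB, hop, (ih _).2]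
      · simp [pvStepA, pvInnerB, hop, pv_open_not_close _ hop, (ih _).2]
    · by_cases hcl : PySem.Chars.startswith (PySem.Chars.strip l.toList) ['<','/','P','a','r','a','m','T','a','b','l','e'] = true
      · constructor
        · simp [pvStepA, pvOuterB, hop, (ih _).1]
        · simp [pvStepA, pvInnerB, hop, hcl, (ih _).1]
      · constructor
        · simp [pvStepA, pvOuterB, hop, (ih _).1]
        · simp [pvStepA, pvInnerB, hop, hcl, (ih _).2]

-- ===== VERDICT (by name: the statement is the Claim_ definition above) =====
theorem normalize_reference_param_tables_py_spec : Claim_equal_normalize_reference_param_tables_py := by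
  intro content _
  unfold Spec_normalize_reference_param_tables_py normalize_reference_param_tables_py
    normalize_reference_param_tables_py_alt
  simp [(pv_fold_eq (PySem.Str.splitlines content) []).1]
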